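-- pv_equiv track=rewrite | github.com/EmreCibikci/2d_3d_asset_scrapper | scrapers/bevouliin_scraper.py | _determine_category_from_title
-- ===== SOURCE A (Python) =====
-- def _determine_category_from_title(title: str) -> str:
--     """Determine category from title"""
--     title_lower = title.lower()
--
--     # Game categories
--     if any(word in title_lower for word in ['character', 'hero', 'player', 'npc']):
--         return 'characters'
--     elif any(word in title_lower for word in ['background', 'scene', 'environment']):
--         return 'backgrounds'
--     elif any(word in title_lower for word in ['particle', 'effect', 'explosion', 'magic']):
--         return 'particles'
--     elif any(word in title_lower for word in ['enemy', 'monster', 'boss', 'villain']):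
--         return 'enemies'
--     elif any(word in title_lower for word in ['card', 'trading', 'deck']):
--         return 'trading-card-game'
--     elif any(word in title_lower for word in ['obstacle', 'barrier', 'wall']):
--         return 'obstacles'
--     elif any(word in title_lower for word in ['ornament', 'decoration', 'border']):
--         return 'ornaments'
--     elif any(word in title_lower for word in ['tower', 'defense', 'turret']):
--         return 'tower-defense-game'
--     elif any(word in title_lower for word in ['logo', 'brand', 'identity']):
--         return 'logo-templates'
--     elif any(word in title_lower for word in ['vector', 'illustration', 'graphic']):
--         return 'vector-illustration'
--     else:
--         return 'game-illustration'
-- ===== SOURCE B (Python) =====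
-- _KEYWORD_PRIORITY = {
--     'character': 0, 'hero': 0, 'player': 0, 'npc': 0,
--     'background': 1, 'scene': 1, 'environment': 1,
--     'particle': 2, 'effect': 2, 'explosion': 2, 'magic': 2,
--     'enemy': 3, 'monster': 3, 'boss': 3, 'villain': 3,
--     'card': 4, 'trading': 4, 'deck': 4,
--     'obstacle': 5, 'barrier': 5, 'wall': 5,
--     'ornament': 6, 'decoration': 6, 'border': 6,
--     'tower': 7, 'defense': 7, 'turret': 7,
--     'logo': 8, 'brand': 8, 'identity': 8,
--     'vector': 9, 'illustration': 9, 'graphic': 9,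
-- }
-- _CATEGORIES = ['characters', 'backgrounds', 'particles', 'enemies',
--                'trading-card-game', 'obstacles', 'ornaments',
--                'tower-defense-game', 'logo-templates', 'vector-illustration']
--
--
-- def _determine_category_from_title(title: str) -> str:
--     # Scan the title position by position, keeping the best (lowest) priority
--     # of any keyword that starts at some position; precedence of the original
--     # if/elif chain = minimum priority over all keyword occurrences.
--     t = title.lower()
--     best = len(_CATEGORIES)
--     for i in range(len(t)):
--         for kw, pri in _KEYWORD_PRIORITY.items():
--             if pri < best and t.startswith(kw, i):
--                 best = pri
--     return _CATEGORIES[best] if best < len(_CATEGORIES) else 'game-illustration'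
-- ===== Notes on version B (the rewrite author's own statement) =====
-- stated objective: alternative
-- what changed: Replaced the ten-branch per-rule if/elif chain by a naive multi-pattern text scan: iterate over the positions of the lowered title, check which keywords start at each position, and keep the minimum rule priority found; A's first matching branch equals the minimum-priority occurrence.
import Mathlib
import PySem

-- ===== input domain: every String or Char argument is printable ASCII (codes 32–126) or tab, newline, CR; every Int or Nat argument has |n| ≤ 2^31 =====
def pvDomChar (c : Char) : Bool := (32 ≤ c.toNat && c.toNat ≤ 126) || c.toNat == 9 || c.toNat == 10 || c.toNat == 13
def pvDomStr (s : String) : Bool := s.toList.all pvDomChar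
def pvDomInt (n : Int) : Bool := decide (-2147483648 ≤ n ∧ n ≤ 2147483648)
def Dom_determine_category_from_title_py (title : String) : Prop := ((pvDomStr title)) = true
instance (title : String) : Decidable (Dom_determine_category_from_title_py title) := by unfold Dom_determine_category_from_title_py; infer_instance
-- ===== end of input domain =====

-- B replaces A's ten-branch if/elif chain by a position-by-position multi-pattern scan of the title
-- keeping the minimum matching rule priority (alternative algorithm, same asymptotic cost, not faster).


-- ===== PORT A =====
-- literal transliteration of the if/elif chain; 'any(word in title_lower for word in [...])' = List.any with PySem.Str.isIn
def determine_category_from_title_py (title : String) : String :=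
  let title_lower := PySem.Str.lower title
  if ["character", "hero", "player", "npc"].any (fun word => PySem.Str.isIn word title_lower) then
    "characters"
  else if ["background", "scene", "environment"].any (fun word => PySem.Str.isIn word title_lower) then
    "backgrounds"
  else if ["particle", "effect", "explosion", "magic"].any (fun word => PySem.Str.isIn word title_lower) then
    "particles"
  else if ["enemy", "monster", "boss", "villain"].any (fun word => PySem.Str.isIn word title_lower) then
    "enemies"
  else if ["card", "trading", "deck"].any (fun word => PySem.Str.isIn word title_lower) then
    "trading-card-game"
  else if ["obstacle", "barrier", "wall"].any (fun word => PySem.Str.isIn word title_lower) then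
    "obstacles"
  else if ["ornament", "decoration", "border"].any (fun word => PySem.Str.isIn word title_lower) then
    "ornaments"
  else if ["tower", "defense", "turret"].any (fun word => PySem.Str.isIn word title_lower) then
    "tower-defense-game"
  else if ["logo", "brand", "identity"].any (fun word => PySem.Str.isIn word title_lower) then
    "logo-templates"
  else if ["vector", "illustration", "graphic"].any (fun word => PySem.Str.isIn word title_lower) then
    "vector-illustration"
  else
    "game-illustration"

-- ===== PORT B =====
-- _KEYWORD_PRIORITY of Source B, in dict insertion order
def pvKW : List (List Char × Nat) :=
  [ ("character".toList, 0), ("hero".toList, 0), ("player".toList, 0), ("npc".toList, 0)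
  , ("background".toList, 1), ("scene".toList, 1), ("environment".toList, 1)
  , ("particle".toList, 2), ("effect".toList, 2), ("explosion".toList, 2), ("magic".toList, 2)
  , ("enemy".toList, 3), ("monster".toList, 3), ("boss".toList, 3), ("villain".toList, 3)
  , ("card".toList, 4), ("trading".toList, 4), ("deck".toList, 4)
  , ("obstacle".toList, 5), ("barrier".toList, 5), ("wall".toList, 5)
  , ("ornament".toList, 6), ("decoration".toList, 6), ("border".toList, 6)
  , ("tower".toList, 7), ("defense".toList, 7), ("turret".toList, 7)
  , ("logo".toList, 8), ("brand".toList, 8), ("identity".toList, 8)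
  , ("vector".toList, 9), ("illustration".toList, 9), ("graphic".toList, 9) ]

-- _CATEGORIES of Source B
def pvCats : List String :=
  [ "characters", "backgrounds", "particles", "enemies", "trading-card-game", "obstacles"
  , "ornaments", "tower-defense-game", "logo-templates", "vector-illustration" ]

-- the inner 'for kw, pri in _KEYWORD_PRIORITY.items(): if pri < best and t.startswith(kw, i): best = pri'
-- (t.startswith(kw, i) = kw is a prefix of the suffix of t at position i, here passed as s)
def pvScanStep (s : List Char) (b : Nat) : Nat :=
  pvKW.foldl (fun b p => if p.2 < b ∧ p.1 <+: s then p.2 else b) b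

-- the outer 'for i in range(len(t))': recursion over the suffixes of t, one per position i
def pvScan : List Char → Nat → Nat
  | [], b => b
  | c :: rest, b => pvScan rest (pvScanStep (c :: rest) b)

def determine_category_from_title_py_alt (title : String) : String :=
  let t := (PySem.Str.lower title).toList
  let best := pvScan t pvCats.length
  if best < pvCats.length then pvCats.getD best "game-illustration" else "game-illustration"

-- ===== PRECONDITION & SPEC =====
def Spec_determine_category_from_title_py (title : String) (out : String) : Prop := out = determine_category_from_title_py_alt title
instance (title : String) (out : String) : Decidable (Spec_determine_category_from_title_py title out) := by unfold Spec_determine_category_from_title_py; infer_instance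

-- ===== CLAIM (what is proved, stated in full; the proofs are below) =====
def Claim_equal_determine_category_from_title_py : Prop := ∀ (title : String), Dom_determine_category_from_title_py title → Spec_determine_category_from_title_py title (determine_category_from_title_py title)

-- ===== LEMMAS AND PROOFS =====

-- the inner fold computes the min of b and the priorities of keywords matching at this position
theorem pvScanStep_aux_le_iff (s : List Char) (K : List (List Char × Nat)) :
    ∀ (b r : Nat),
      (K.foldl (fun b p => if p.2 < b ∧ p.1 <+: s then p.2 else b) b) ≤ r ↔
        b ≤ r ∨ ∃ p ∈ K, p.2 ≤ r ∧ p.1 <+: s := by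
  induction K with
  | nil => simp
  | cons p K ih =>
    intro b r
    simp only [List.foldl_cons, ih, List.mem_cons]
    constructor
    · rintro (h | ⟨q, hq, hr, hp⟩)
      · split_ifs at h with hc
        · exact Or.inr ⟨p, Or.inl rfl, h, hc.2⟩
        · exact Or.inl h
      · exact Or.inr ⟨q, Or.inr hq, hr, hp⟩
    · rintro (h | ⟨q, hq | hq, hr, hp⟩)
      · left; split_ifs with hc
        · omega
        · exact h
      · subst hq
        left; split_ifs with hc
        · exact hr
        · rcases not_and_or.mp hc with hc | hc
          · omega
          · exact absurd hp hc
      · exact Or.inr ⟨q, hq, hr, hp⟩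

theorem pvScan_le_iff (s : List Char) :
    ∀ (b r : Nat), pvScan s b ≤ r ↔ b ≤ r ∨ ∃ p ∈ pvKW, p.2 ≤ r ∧ p.1 <:+: s := by
  induction s with
  | nil =>
    intro b r
    have hne : ∀ p ∈ pvKW, p.1 ≠ [] := by decide
    simp only [pvScan, List.infix_nil]
    constructor
    · exact Or.inl
    · rintro (h | ⟨p, hp, _, hnil⟩)
      · exact h
      · exact absurd hnil (hne p hp)
  | cons c rest ih =>
    intro b r
    simp only [pvScan, pvScanStep, ih, pvScanStep_aux_le_iff]
    constructor
    · rintro ((h | ⟨p, hp, hr, hpre⟩) | ⟨p, hp, hr, hinf⟩)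
      · exact Or.inl h
      · exact Or.inr ⟨p, hp, hr, hpre.isInfix⟩
      · exact Or.inr ⟨p, hp, hr, hinf.trans (List.suffix_cons c rest).isInfix⟩
    · rintro (h | ⟨p, hp, hr, hinf⟩)
      · exact Or.inl (Or.inl h)
      · rcases List.infix_cons_iff.mp hinf with hpre | hinf'
        · exact Or.inl (Or.inr ⟨p, hp, hr, hpre⟩)
        · exact Or.inr ⟨p, hp, hr, hinf'⟩

-- ===== VERDICT (by name: the statement is the Claim_ definition above) =====
set_option maxHeartbeats 1000000 in
theorem determine_category_from_title_py_spec : Claim_equal_determine_category_from_title_py := by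
  intro title _
  unfold Spec_determine_category_from_title_py determine_category_from_title_py
  set L : List Char := (PySem.Str.lower title).toList with hL
  have key := pvScan_le_iff L pvCats.length
  have h0 := key 0; have h1 := key 1; have h2 := key 2; have h3 := key 3
  have h4 := key 4; have h5 := key 5; have h6 := key 6; have h7 := key 7
  have h8 := key 8; have h9 := key 9
  have hub : pvScan L 10 ≤ 10 := (pvScan_le_iff L 10 10).mpr (Or.inl le_rfl)
  have halt : determine_category_from_title_py_alt title =
      (if pvScan L 10 < 10 then pvCats.getD (pvScan L 10) "game-illustration"
       else "game-illustration") := by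
    simp only [determine_category_from_title_py_alt, ← hL]; norm_num [pvCats]
  simp only [pvKW, pvCats, List.length_cons, List.length_nil, List.mem_cons,
    List.not_mem_nil] at h0 h1 h2 h3 h4 h5 h6 h7 h8 h9
  simp only [List.any_cons, List.any_nil, Bool.or_eq_true, PySem.Str.isIn_iff_infix, ← hL]
  norm_num at h0 h1 h2 h3 h4 h5 h6 h7 h8 h9 ⊢
  split_ifs with c1 c2 c3 c4 c5 c6 c7 c8 c9 c10
  · have hb : pvScan L 10 = 0 := h0.mpr (by rcases c1 with h|h|h|h; exacts [Or.inl h, Or.inr (Or.inl h), Or.inr (Or.inr (Or.inl h)), Or.inr (Or.inr (Or.inr (h)))])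
    rw [halt, hb]; decide
  · have hb : pvScan L 10 = 1 := by
      have ha : pvScan L 10 ≤ 1 := h1.mpr (by rcases c2 with h|h|h; exacts [Or.inr (Or.inr (Or.inr (Or.inr (Or.inl h)))), Or.inr (Or.inr (Or.inr (Or.inr (Or.inr (Or.inl h))))), Or.inr (Or.inr (Or.inr (Or.inr (Or.inr (Or.inr (h))))))])
      have hc : pvScan L 10 ≠ 0 := fun hh => by rcases h0.mp hh with h|h|h|h; exacts [c1 (Or.inl h), c1 (Or.inr (Or.inl h)), c1 (Or.inr (Or.inr (Or.inl h))), c1 (Or.inr (Or.inr (Or.inr (h))))]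
      omega
    rw [halt, hb]; decide
  · have hb : pvScan L 10 = 2 := by
      have ha : pvScan L 10 ≤ 2 := h2.mpr (by rcases c3 with h|h|h|h; exacts [Or.inr (Or.inr (Or.inr (Or.inr (Or.inr (Or.inr (Or.inr (Or.inl h))))))), Or.inr (Or.inr (Or.inr (Or.inr (Or.inr (Or.inr (Or.inr (Or.inr (Or.inl h)))))))), Or.inr (Or.inr (Or.inr (Or.inr (Or.inr (Or.inr (Or.inr (Or.inr (Or.inr (Or.inl h))))))))), Or.inr (Or.inr (Or.inr (Or.inr (Or.inr (Or.inr (Or.inr (Or.inr (Or.inr (Or.inr (h))))))))))])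
      have hc : ¬ pvScan L 10 ≤ 1 := fun hh => by rcases h1.mp hh with h|h|h|h|h|h|h; exacts [c1 (Or.inl h), c1 (Or.inr (Or.inl h)), c1 (Or.inr (Or.inr (Or.inl h))), c1 (Or.inr (Or.inr (Or.inr (h)))), c2 (Or.inl h), c2 (Or.inr (Or.inl h)), c2 (Or.inr (Or.inr (h)))]
      omega
    rw [halt, hb]; decide
  · have hb : pvScan L 10 = 3 := by
      have ha : pvScan L 10 ≤ 3 := h3.mpr (by rcases c4 with h|h|h|h; exacts [Or.inr (Or.inr (Or.inr (Or.inr (Or.inr (Or.inr (Or.inr (Or.inr (Or.inr (Or.inr (Or.inr (Or.inl h))))))))))), Or.inr (Or.inr (Or.inr (Or.inr (Or.inr (Or.inr (Or.inr (Or.inr (Or.inr (Or.inr (Or.inr (Or.inr (Or.inl h)))))))))))), Or.inr (Or.inr (Or.inr (Or.inr (Or.inr (Or.inr (Or.inr (Or.inr (Or.inr (Or.inr (Or.inr (Or.inr (Or.inr (Or.inl h))))))))))))), Or.inr (Or.inr (Or.inr (Or.inr (Or.inr (Or.inr (Or.inr (Or.inr (Or.inr (Or.inr (Or.inr (Or.inr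 (Or.inr (Or.inr (h))))))))))))))])
      have hc : ¬ pvScan L 10 ≤ 2 := fun hh => by rcases h2.mp hh with h|h|h|h|h|h|h|h|h|h|h; exacts [c1 (Or.inl h), c1 (Or.inr (Or.inl h)), c1 (Or.inr (Or.inr (Or.inl h))), c1 (Or.inr (Or.inr (Or.inr (h)))), c2 (Or.inl h), c2 (Or.inr (Or.inl h)), c2 (Or.inr (Or.inr (h))), c3 (Or.inl h), c3 (Or.inr (Or.inl h)), c3 (Or.inr (Or.inr (Or.inl h))), c3 (Or.inr (Or.inr (Or.inr (h))))]
      omega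
    rw [halt, hb]; decide
  · have hb : pvScan L 10 = 4 := by
      have ha : pvScan L 10 ≤ 4 := h4.mpr (by rcases c5 with h|h|h; exacts [Or.inr (Or.inr (Or.inr (Or.inr (Or.inr (Or.inr (Or.inr (Or.inr (Or.inr (Or.inr (Or.inr (Or.inr (Or.inr (Or.inr (Or.inr (Or.inl h))))))))))))))), Or.inr (Or.inr (Or.inr (Or.inr (Or.inr (Or.inr (Or.inr (Or.inr (Or.inr (Or.inr (Or.inr (Or.inr (Or.inr (Or.inr (Or.inr (Or.inr (Or.inl h)))))))))))))))), Or.inr (Or.inr (Or.inr (Or.inr (Or.inr (Or.inr (Or.inr (Or.inr (Or.inr (Or.inr (Or.inr (Or.inr (Or.inr (Or.inr (Or.inr (Or.inr (Or.inr (h)))))))))))))))))])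
      have hc : ¬ pvScan L 10 ≤ 3 := fun hh => by rcases h3.mp hh with h|h|h|h|h|h|h|h|h|h|h|h|h|h|h; exacts [c1 (Or.inl h), c1 (Or.inr (Or.inl h)), c1 (Or.inr (Or.inr (Or.inl h))), c1 (Or.inr (Or.inr (Or.inr (h)))), c2 (Or.inl h), c2 (Or.inr (Or.inl h)), c2 (Or.inr (Or.inr (h))), c3 (Or.inl h), c3 (Or.inr (Or.inl h)), c3 (Or.inr (Or.inr (Or.inl h))), c3 (Or.inr (Or.inr (Or.inr (h)))), c4 (Or.inl h), c4 (Or.inr (Or.inl h)), c4 (Or.inr (Or.inr (Or.inl h))), c4 (Or.inr (Or.inr (Or.inr (h))))]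
      omega
    rw [halt, hb]; decide
  · have hb : pvScan L 10 = 5 := by
      have ha : pvScan L 10 ≤ 5 := h5.mpr (by rcases c6 with h|h|h; exacts [Or.inr (Or.inr (Or.inr (Or.inr (Or.inr (Or.inr (Or.inr (Or.inr (Or.inr (Or.inr (Or.inr (Or.inr (Or.inr (Or.inr (Or.inr (Or.inr (Or.inr (Or.inr (Or.inl h)))))))))))))))))), Or.inr (Or.inr (Or.inr (Or.inr (Or.inr (Or.inr (Or.inr (Or.inr (Or.inr (Or.inr (Or.inr (Or.inr (Or.inr (Or.inr (Or.inr (Or.inr (Or.inr (Or.inr (Or.inr (Or.inl h))))))))))))))))))), Or.inr (Or.inr (Or.inr (Or.inr (Or.inr (Or.inr (Or.inr (Or.inr (Or.inr (Or.inr (Or.inr (Or.inr (Or.inr (Or.inr (Or.inr (Or.inr (Or.inr (Or.inr (Or.inr (Or.inr (h))))))))))))))))))))])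
      have hc : ¬ pvScan L 10 ≤ 4 := fun hh => by rcases h4.mp hh with h|h|h|h|h|h|h|h|h|h|h|h|h|h|h|h|h|h; exacts [c1 (Or.inl h), c1 (Or.inr (Or.inl h)), c1 (Or.inr (Or.inr (Or.inl h))), c1 (Or.inr (Or.inr (Or.inr (h)))), c2 (Or.inl h), c2 (Or.inr (Or.inl h)), c2 (Or.inr (Or.inr (h))), c3 (Or.inl h), c3 (Or.inr (Or.inl h)), c3 (Or.inr (Or.inr (Or.inl h))), c3 (Or.inr (Or.inr (Or.inr (h)))), c4 (Or.inl h), c4 (Or.inr (Or.inl h)), c4 (Or.inr (Or.inr (Or.inl h))), c4 (Or.inr (Or.inr (Or.inr (h)))), c5 (Or.inl h), c5 (Or.inr (Or.inl h)), c5 (Or.inr (Or.inr (h)))]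
      omega
    rw [halt, hb]; decide
  · have hb : pvScan L 10 = 6 := by
      have ha : pvScan L 10 ≤ 6 := h6.mpr (by rcases c7 with h|h|h; exacts [Or.inr (Or.inr (Or.inr (Or.inr (Or.inr (Or.inr (Or.inr (Or.inr (Or.inr (Or.inr (Or.inr (Or.inr (Or.inr (Or.inr (Or.inr (Or.inr (Or.inr (Or.inr (Or.inr (Or.inr (Or.inr (Or.inl h))))))))))))))))))))), Or.inr (Or.inr (Or.inr (Or.inr (Or.inr (Or.inr (Or.inr (Or.inr (Or.inr (Or.inr (Or.inr (Or.inr (Or.inr (Or.inr (Or.inr (Or.inr (Or.inr (Or.inr (Or.inr (Or.inr (Or.inr (Or.inr (Or.inl h)))))))))))))))))))))), Or.inr (Or.inr (Or.inr (Or.inr (Or.inr (Or.inr (Or.inr (Or.inr (Or.inr (Or.inr (Or.inr (Or.inr (Or.inr (Or.inr (Or.inr (Or.inr (Or.inr (Or.inr (Or.inr (Or.inr (Or.inr (Or.inr (Or.inr (h)))))))))))))))))))))))])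
      have hc : ¬ pvScan L 10 ≤ 5 := fun hh => by rcases h5.mp hh with h|h|h|h|h|h|h|h|h|h|h|h|h|h|h|h|h|h|h|h|h; exacts [c1 (Or.inl h), c1 (Or.inr (Or.inl h)), c1 (Or.inr (Or.inr (Or.inl h))), c1 (Or.inr (Or.inr (Or.inr (h)))), c2 (Or.inl h), c2 (Or.inr (Or.inl h)), c2 (Or.inr (Or.inr (h))), c3 (Or.inl h), c3 (Or.inr (Or.inl h)), c3 (Or.inr (Or.inr (Or.inl h))), c3 (Or.inr (Or.inr (Or.inr (h)))), c4 (Or.inl h), c4 (Or.inr (Or.inl h)), c4 (Or.inr (Or.inr (Or.inl h))), c4 (Or.inr (Or.inr (Or.inr (h)))), c5 (Or.inl h), c5 (Or.inr (Or.inl h)), c5 (Or.inr (Or.inr (h))), c6 (Or.inl h), c6 (Or.inr (Or.inl h)), c6 (Or.inr (Or.inr (h)))]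
      omega
    rw [halt, hb]; decide
  · have hb : pvScan L 10 = 7 := by
      have ha : pvScan L 10 ≤ 7 := h7.mpr (by rcases c8 with h|h|h; exacts [Or.inr (Or.inr (Or.inr (Or.inr (Or.inr (Or.inr (Or.inr (Or.inr (Or.inr (Or.inr (Or.inr (Or.inr (Or.inr (Or.inr (Or.inr (Or.inr (Or.inr (Or.inr (Or.inr (Or.inr (Or.inr (Or.inr (Or.inr (Or.inr (Or.inl h)))))))))))))))))))))))), Or.inr (Or.inr (Or.inr (Or.inr (Or.inr (Or.inr (Or.inr (Or.inr (Or.inr (Or.inr (Or.inr (Or.inr (Or.inr (Or.inr (Or.inr (Or.inr (Or.inr (Or.inr (Or.inr (Or.inr (Or.inr (Or.inr (Or.inr (Or.inr (Or.inr (Or.inl h))))))))))))))))))))))))), Or.inr (Or.inr (Or.inr (Or.inr (Or.inr (Or.inr (Or.inr (Or.inr (Or.inr (Or.inr (Or.inr (Or.inr (Or.inr (Or.inr (Or.inr (Or.inr (Or.inr (Or.inr (Or.inr (Or.inr (Or.inr (Or.inr (Or.inr (Or.inr (Or.inr (Or.inr (h))))))))))))))))))))))))))])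
      have hc : ¬ pvScan L 10 ≤ 6 := fun hh => by rcases h6.mp hh with h|h|h|h|h|h|h|h|h|h|h|h|h|h|h|h|h|h|h|h|h|h|h|h; exacts [c1 (Or.inl h), c1 (Or.inr (Or.inl h)), c1 (Or.inr (Or.inr (Or.inl h))), c1 (Or.inr (Or.inr (Or.inr (h)))), c2 (Or.inl h), c2 (Or.inr (Or.inl h)), c2 (Or.inr (Or.inr (h))), c3 (Or.inl h), c3 (Or.inr (Or.inl h)), c3 (Or.inr (Or.inr (Or.inl h))), c3 (Or.inr (Or.inr (Or.inr (h)))), c4 (Or.inl h), c4 (Or.inr (Or.inl h)), c4 (Or.inr (Or.inr (Or.inl h))), c4 (Or.inr (Or.inr (Or.inr (h)))), c5 (Or.inl h), c5 (Or.inr (Or.inl h)), c5 (Or.inr (Or.inr (h))), c6 (Or.inl h), c6 (Or.inr (Or.inl h)), c6 (Or.inr (Or.inr (h))), c7 (Or.inl h), c7 (Or.inr (Or.inl h)), c7 (Or.inr (Or.inr (h)))]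
      omega
    rw [halt, hb]; decide
  · have hb : pvScan L 10 = 8 := by
      have ha : pvScan L 10 ≤ 8 := h8.mpr (by rcases c9 with h|h|h; exacts [Or.inr (Or.inr (Or.inr (Or.inr (Or.inr (Or.inr (Or.inr (Or.inr (Or.inr (Or.inr (Or.inr (Or.inr (Or.inr (Or.inr (Or.inr (Or.inr (Or.inr (Or.inr (Or.inr (Or.inr (Or.inr (Or.inr (Or.inr (Or.inr (Or.inr (Or.inr (Or.inr (Or.inl h))))))))))))))))))))))))))), Or.inr (Or.inr (Or.inr (Or.inr (Or.inr (Or.inr (Or.inr (Or.inr (Or.inr (Or.inr (Or.inr (Or.inr (Or.inr (Or.inr (Or.inr (Or.inr (Or.inr (Or.inr (Or.inr (Or.inr (Or.inr (Or.inr (Or.inr (Or.inr (Or.inr (Or.inr (Or.inr (Or.inr (Or.inl h)))))))))))))))))))))))))))), Or.inr (Or.inr (Or.inr (Or.inr (Or.inr (Or.inr (Or.inr (Or.inr (Or.inr (Or.inr (Or.inr (Or.inr (Or.inr (Or.inr (Or.inr (Or.inr (Or.inr (Or.inr (Or.inr (Or.inr (Or.inr (Or.inr (Or.inr (Or.inr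 (Or.inr (Or.inr (Or.inr (Or.inr (Or.inr (h)))))))))))))))))))))))))))))])
      have hc : ¬ pvScan L 10 ≤ 7 := fun hh => by rcases h7.mp hh with h|h|h|h|h|h|h|h|h|h|h|h|h|h|h|h|h|h|h|h|h|h|h|h|h|h|h; exacts [c1 (Or.inl h), c1 (Or.inr (Or.inl h)), c1 (Or.inr (Or.inr (Or.inl h))), c1 (Or.inr (Or.inr (Or.inr (h)))), c2 (Or.inl h), c2 (Or.inr (Or.inl h)), c2 (Or.inr (Or.inr (h))), c3 (Or.inl h), c3 (Or.inr (Or.inl h)), c3 (Or.inr (Or.inr (Or.inl h))), c3 (Or.inr (Or.inr (Or.inr (h)))), c4 (Or.inl h), c4 (Or.inr (Or.inl h)), c4 (Or.inr (Or.inr (Or.inl h))), c4 (Or.inr (Or.inr (Or.inr (h)))), c5 (Or.inl h), c5 (Or.inr (Or.inl h)), c5 (Or.inr (Or.inr (h))), c6 (Or.inl h), c6 (Or.inr (Or.inl h)), c6 (Or.inr (Or.inr (h))), c7 (Or.inl h), c7 (Or.inr (Or.inl h)), c7 (Or.inr (Or.inr (h))), c8 (Or.inl h), c8 (Or.inr (Or.inl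 h)), c8 (Or.inr (Or.inr (h)))]
      omega
    rw [halt, hb]; decide
  · have hb : pvScan L 10 = 9 := by
      have ha : pvScan L 10 ≤ 9 := h9.mpr (by rcases c10 with h|h|h; exacts [Or.inr (Or.inr (Or.inr (Or.inr (Or.inr (Or.inr (Or.inr (Or.inr (Or.inr (Or.inr (Or.inr (Or.inr (Or.inr (Or.inr (Or.inr (Or.inr (Or.inr (Or.inr (Or.inr (Or.inr (Or.inr (Or.inr (Or.inr (Or.inr (Or.inr (Or.inr (Or.inr (Or.inr (Or.inr (Or.inr (Or.inl h)))))))))))))))))))))))))))))), Or.inr (Or.inr (Or.inr (Or.inr (Or.inr (Or.inr (Or.inr (Or.inr (Or.inr (Or.inr (Or.inr (Or.inr (Or.inr (Or.inr (Or.inr (Or.inr (Or.inr (Or.inr (Or.inr (Or.inr (Or.inr (Or.inr (Or.inr (Or.inr (Or.inr (Or.inr (Or.inr (Or.inr (Or.inr (Or.inr (Or.inr (Or.inl h))))))))))))))))))))))))))))))), Or.inr (Or.inr (Or.inr (Or.inr (Or.inr (Or.inr (Or.inr (Or.inr (Or.inr (Or.inr (Or.inr (Or.inr (Or.inr (Or.inr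 (Or.inr (Or.inr (Or.inr (Or.inr (Or.inr (Or.inr (Or.inr (Or.inr (Or.inr (Or.inr (Or.inr (Or.inr (Or.inr (Or.inr (Or.inr (Or.inr (Or.inr (Or.inr (h))))))))))))))))))))))))))))))))])
      have hc : ¬ pvScan L 10 ≤ 8 := fun hh => by rcases h8.mp hh with h|h|h|h|h|h|h|h|h|h|h|h|h|h|h|h|h|h|h|h|h|h|h|h|h|h|h|h|h|h; exacts [c1 (Or.inl h), c1 (Or.inr (Or.inl h)), c1 (Or.inr (Or.inr (Or.inl h))), c1 (Or.inr (Or.inr (Or.inr (h)))), c2 (Or.inl h), c2 (Or.inr (Or.inl h)), c2 (Or.inr (Or.inr (h))), c3 (Or.inl h), c3 (Or.inr (Or.inl h)), c3 (Or.inr (Or.inr (Or.inl h))), c3 (Or.inr (Or.inr (Or.inr (h)))), c4 (Or.inl h), c4 (Or.inr (Or.inl h)), c4 (Or.inr (Or.inr (Or.inl h))), c4 (Or.inr (Or.inr (Or.inr (h)))), c5 (Or.inl h), c5 (Or.inr (Or.inl h)), c5 (Or.inr (Or.inr (h))), c6 (Or.inl h), c6 (Or.inr (Or.inl h)), c6 (Or.inr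 (Or.inr (h))), c7 (Or.inl h), c7 (Or.inr (Or.inl h)), c7 (Or.inr (Or.inr (h))), c8 (Or.inl h), c8 (Or.inr (Or.inl h)), c8 (Or.inr (Or.inr (h))), c9 (Or.inl h), c9 (Or.inr (Or.inl h)), c9 (Or.inr (Or.inr (h)))]
      omega
    rw [halt, hb]; decide
  · have hb : pvScan L 10 = 10 := by
      have hc : ¬ pvScan L 10 ≤ 9 := fun hh => by rcases h9.mp hh with h|h|h|h|h|h|h|h|h|h|h|h|h|h|h|h|h|h|h|h|h|h|h|h|h|h|h|h|h|h|h|h|h; exacts [c1 (Or.inl h), c1 (Or.inr (Or.inl h)), c1 (Or.inr (Or.inr (Or.inl h))), c1 (Or.inr (Or.inr (Or.inr (h)))), c2 (Or.inl h), c2 (Or.inr (Or.inl h)), c2 (Or.inr (Or.inr (h))), c3 (Or.inl h), c3 (Or.inr (Or.inl h)), c3 (Or.inr (Or.inr (Or.inl h))), c3 (Or.inr (Or.inr (Or.inr (h)))), c4 (Or.inl h), c4 (Or.inr (Or.inl h)), c4 (Or.inr (Or.inr (Or.inl h))), c4 (Or.inr (Or.inr (Or.inr (h)))), c5 (Or.inl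 h), c5 (Or.inr (Or.inl h)), c5 (Or.inr (Or.inr (h))), c6 (Or.inl h), c6 (Or.inr (Or.inl h)), c6 (Or.inr (Or.inr (h))), c7 (Or.inl h), c7 (Or.inr (Or.inl h)), c7 (Or.inr (Or.inr (h))), c8 (Or.inl h), c8 (Or.inr (Or.inl h)), c8 (Or.inr (Or.inr (h))), c9 (Or.inl h), c9 (Or.inr (Or.inl h)), c9 (Or.inr (Or.inr (h))), c10 (Or.inl h), c10 (Or.inr (Or.inl h)), c10 (Or.inr (Or.inr (h)))]
      omega
    rw [halt, hb]; decide
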